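-- pv_equiv track=rewrite | github.com/leolilley/ryeos | ryeos/bundles/standard/ryeos_std/.ai/tools/rye/file-system/edit_lines.py | apply_changes
-- ===== SOURCE A (Python) =====
-- def apply_changes(
--     lines: list[str], changes: list[dict], id_to_line: dict[str, int]
-- ) -> tuple[list[str], int]:
--     """Apply changes to lines.
--
--     Returns:
--         (new_lines, lines_changed_count)
--     """
--     line_changes = []
--
--     for change in changes:
--         new_content = change.get("new_content", "")
--
--         if "line_id" in change:
--             line_num = id_to_line[change["line_id"]]
--             line_changes.append((line_num, line_num, new_content.splitlines()))
--         elif "start_line_id" in change and "end_line_id" in change: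
--             start_num = id_to_line[change["start_line_id"]]
--             end_num = id_to_line[change["end_line_id"]]
--             line_changes.append((start_num, end_num, new_content.splitlines()))
--
--     line_changes.sort(key=lambda x: x[0], reverse=True)
--
--     new_lines = lines.copy()
--     lines_changed = 0
--
--     for start_num, end_num, new_content_lines in line_changes:
--         lines_affected = end_num - start_num + 1
--         lines_changed += max(lines_affected, len(new_content_lines))
--
--         del new_lines[start_num - 1 : end_num]
--         for i, content_line in enumerate(reversed(new_content_lines)):
--             new_lines.insert(start_num - 1, content_line)
--
--     return new_lines, lines_changed
-- ===== SOURCE B (Python) =====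
-- def _target(change, id_to_line):
--     """Resolve the (start, end) line range a change addresses, or None."""
--     if "line_id" in change:
--         n = id_to_line[change["line_id"]]
--         return (n, n)
--     if "start_line_id" in change and "end_line_id" in change:
--         return (id_to_line[change["start_line_id"]], id_to_line[change["end_line_id"]])
--     return None
--
--
-- def apply_changes(lines, changes, id_to_line):
--     """Apply changes to lines.
--
--     Returns:
--         (new_lines, lines_changed_count)
--     """
--     repls = []
--     for change in changes:
--         t = _target(change, id_to_line)
--         if t is not None:
--             repls.append((t[0], t[1], change.get("new_content", "").splitlines()))
--     repls.sort(key=lambda r: r[0])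
--
--     out = []
--     pos = 0  # 0-based index of the next original line still to emit
--     changed = 0
--     for s, e, content in repls:
--         out += lines[pos : s - 1]
--         out += content
--         changed += max(e - s + 1, len(content))
--         pos = e
--     out += lines[pos:]
--     return out, changed
-- ===== Notes on version B (the rewrite author's own statement) =====
-- stated objective: alternative
-- what changed: B replaces A's reverse-sorted sequence of in-place slice deletions and per-line inserts by one ascending merge pass that emits untouched segments of the original lines and the replacement blocks into a fresh list; Pre_ excludes inputs with a missing line id (A raises KeyError) and inputs whose resolved ranges are reversed, out of bounds or overlapping, where no replacement behaviour is specified and A's and B's values are equally defensible.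
import Mathlib
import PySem

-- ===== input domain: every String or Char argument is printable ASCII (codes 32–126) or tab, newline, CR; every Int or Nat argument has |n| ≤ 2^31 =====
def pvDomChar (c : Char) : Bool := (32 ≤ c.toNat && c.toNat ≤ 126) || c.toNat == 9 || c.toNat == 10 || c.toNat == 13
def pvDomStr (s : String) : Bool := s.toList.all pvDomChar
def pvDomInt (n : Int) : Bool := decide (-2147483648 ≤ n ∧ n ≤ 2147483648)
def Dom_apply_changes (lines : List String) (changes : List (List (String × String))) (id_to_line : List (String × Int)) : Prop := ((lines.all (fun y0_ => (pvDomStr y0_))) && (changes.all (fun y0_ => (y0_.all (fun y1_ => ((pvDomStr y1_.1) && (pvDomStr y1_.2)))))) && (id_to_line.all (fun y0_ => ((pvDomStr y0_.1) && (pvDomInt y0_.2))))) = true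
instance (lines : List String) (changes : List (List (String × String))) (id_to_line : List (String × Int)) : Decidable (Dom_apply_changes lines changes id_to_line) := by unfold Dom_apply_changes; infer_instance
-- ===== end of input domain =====

-- B replaces A's descending in-place delete/insert passes by one ascending merge pass over the
-- original lines (objective: alternative algorithm, same measured cost); return value only.

-- ===== PORT A =====
-- id_to_line[k] is KeyError when k is absent; ported totally via getD (default 0), Pre_ excludes those inputs.
def apply_changes (lines : List String) (changes : List (List (String × String))) (id_to_line : List (String × Int)) : List String × Int :=
  let idm := PySem.Dict.ofList id_to_line
  let line_changes : List (Int × Int × List String) := changes.foldl (fun acc change =>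
    let chd := PySem.Dict.ofList change
    let new_content := PySem.Dict.getD chd "new_content" ""
    if PySem.Dict.contains chd "line_id" then
      let line_num := PySem.Dict.getD idm (PySem.Dict.getD chd "line_id" "") 0
      acc ++ [(line_num, line_num, PySem.Str.splitlines new_content)]
    else if PySem.Dict.contains chd "start_line_id" && PySem.Dict.contains chd "end_line_id" then
      let start_num := PySem.Dict.getD idm (PySem.Dict.getD chd "start_line_id" "") 0
      let end_num := PySem.Dict.getD idm (PySem.Dict.getD chd "end_line_id" "") 0
      acc ++ [(start_num, end_num, PySem.Str.splitlines new_content)]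
    else acc) []
  let line_changes := PySem.List.sorted line_changes (fun x => x.1) true
  let res := line_changes.foldl (fun (st : List String × Int) r =>
    let start_num := r.1
    let end_num := r.2.1
    let new_content_lines := r.2.2
    let lines_affected := end_num - start_num + 1
    let lines_changed := st.2 + max lines_affected (new_content_lines.length : Int)
    -- del new_lines[start_num - 1 : end_num]: exact — the parts before and after the resolved slice remain
    let s' := PySem.List.clampIdx st.1.length (start_num - 1)
    let e' := PySem.List.clampIdx st.1.length end_num
    let new_lines := st.1.take s' ++ st.1.drop (max s' e')
    -- for content_line in reversed(new_content_lines): new_lines.insert(start_num - 1, content_line)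
    let new_lines := new_content_lines.reverse.foldl (fun L content_line => PySem.List.insert L (start_num - 1) content_line) new_lines
    (new_lines, lines_changed)) (lines, 0)
  res

-- ===== PORT B =====
-- helper _target of Source B
def pvTargetB (change : PySem.Dict String String) (idm : PySem.Dict String Int) : Option (Int × Int) :=
  if PySem.Dict.contains change "line_id" then
    let n := PySem.Dict.getD idm (PySem.Dict.getD change "line_id" "") 0
    some (n, n)
  else if PySem.Dict.contains change "start_line_id" && PySem.Dict.contains change "end_line_id" then
    some (PySem.Dict.getD idm (PySem.Dict.getD change "start_line_id" "") 0,
          PySem.Dict.getD idm (PySem.Dict.getD change "end_line_id" "") 0)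
  else none

def apply_changes_alt (lines : List String) (changes : List (List (String × String))) (id_to_line : List (String × Int)) : List String × Int :=
  let idm := PySem.Dict.ofList id_to_line
  let repls : List (Int × Int × List String) := changes.foldl (fun acc change =>
    let chd := PySem.Dict.ofList change
    match pvTargetB chd idm with
    | some t => acc ++ [(t.1, t.2, PySem.Str.splitlines (PySem.Dict.getD chd "new_content" ""))]
    | none => acc) []
  let repls := PySem.List.sorted repls (fun r => r.1) false
  let st := repls.foldl (fun (st : List String × Int × Int) r =>
    let out := st.1 ++ PySem.List.slice lines (some st.2.1) (some (r.1 - 1)) ++ r.2.2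
    let changed := st.2.2 + max (r.2.1 - r.1 + 1) (r.2.2.length : Int)
    (out, r.2.1, changed)) ([], 0, 0)
  (st.1 ++ PySem.List.slice lines (some st.2.1) none, st.2.2)

-- ===== PRECONDITION & SPEC =====
-- the (start, end) range each change addresses; none = the Python raises KeyError there
def pvRangeOfChange (change : List (String × String)) (idm : PySem.Dict String Int) : Option (Option (Int × Int)) :=
  let chd := PySem.Dict.ofList change
  if PySem.Dict.contains chd "line_id" then
    match PySem.Dict.get? idm (PySem.Dict.getD chd "line_id" "") with
    | some n => some (some (n, n))
    | none => none
  else if PySem.Dict.contains chd "start_line_id" && PySem.Dict.contains chd "end_line_id" then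
    match PySem.Dict.get? idm (PySem.Dict.getD chd "start_line_id" ""),
          PySem.Dict.get? idm (PySem.Dict.getD chd "end_line_id" "") with
    | some s, some e => some (some (s, e))
    | _, _ => none
  else some none

def pvRanges? (changes : List (List (String × String))) (id_to_line : List (String × Int)) : Option (List (Int × Int)) :=
  let idm := PySem.Dict.ofList id_to_line
  changes.foldr (fun c acc =>
    match pvRangeOfChange c idm, acc with
    | some (some r), some rs => some (r :: rs)
    | some none, some rs => some rs
    | _, _ => none) (some [])

-- Pre_ excludes (a) changes whose line id is missing from id_to_line (A raises KeyError there), and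
-- (b) inputs whose resolved ranges are reversed, out of the 1..len(lines) bounds, or mutually
-- overlapping: such ranges do not describe a replacement of existing lines, no behaviour is
-- specified for them, and A's and B's values there (both shaped by Python's slice clamping and by
-- the order the replacements are applied in) are equally defensible.
def Pre_apply_changes (lines : List String) (changes : List (List (String × String))) (id_to_line : List (String × Int)) : Prop :=
  pvRanges? changes id_to_line ≠ none ∧
  (∀ r ∈ (pvRanges? changes id_to_line).getD [], 1 ≤ r.1 ∧ r.1 ≤ r.2 ∧ r.2 ≤ (lines.length : Int)) ∧
  ((pvRanges? changes id_to_line).getD []).Pairwise (fun a b => a.2 < b.1 ∨ b.2 < a.1)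

instance (lines : List String) (changes : List (List (String × String))) (id_to_line : List (String × Int)) : Decidable (Pre_apply_changes lines changes id_to_line) := by
  unfold Pre_apply_changes; infer_instance

def pvWitness_apply_changes : List String × (List (List (String × String))) × (List (String × Int)) :=
  (["a", "b", "c"], [[("line_id", "x"), ("new_content", "p\nq")]], [("x", 2)])

def Spec_apply_changes (lines : List String) (changes : List (List (String × String))) (id_to_line : List (String × Int)) (out : List String × Int) : Prop := out = apply_changes_alt lines changes id_to_line
instance (lines : List String) (changes : List (List (String × String))) (id_to_line : List (String × Int)) (out : List String × Int) : Decidable (Spec_apply_changes lines changes id_to_line out) := by unfold Spec_apply_changes; infer_instance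

-- ===== CLAIM (what is proved, stated in full; the proofs are below) =====
def Claim_equal_apply_changes : Prop := ∀ (lines : List String) (changes : List (List (String × String))) (id_to_line : List (String × Int)), Dom_apply_changes lines changes id_to_line → Pre_apply_changes lines changes id_to_line → Spec_apply_changes lines changes id_to_line (apply_changes lines changes id_to_line)

-- ===== LEMMAS AND PROOFS =====

-- what one change contributes to A's line_changes list
def pvItemA (idm : PySem.Dict String Int) (change : List (String × String)) : List (Int × Int × List String) :=
  let chd := PySem.Dict.ofList change
  let new_content := PySem.Dict.getD chd "new_content" ""
  if PySem.Dict.contains chd "line_id" then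
    let n := PySem.Dict.getD idm (PySem.Dict.getD chd "line_id" "") 0
    [(n, n, PySem.Str.splitlines new_content)]
  else if PySem.Dict.contains chd "start_line_id" && PySem.Dict.contains chd "end_line_id" then
    [(PySem.Dict.getD idm (PySem.Dict.getD chd "start_line_id" "") 0,
      PySem.Dict.getD idm (PySem.Dict.getD chd "end_line_id" "") 0,
      PySem.Str.splitlines new_content)]
  else []

-- the weight a change's triple adds to lines_changed
def pvW (r : Int × Int × List String) : Int := max (r.2.1 - r.1 + 1) ((r.2.2.length : Int))

-- the merged result, reading the original lines left to right
def pvMerge (lines : List String) : Nat → List (Int × Int × List String) → List String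
  | pos, [] => lines.drop pos
  | pos, r :: rest => (lines.drop pos).take ((r.1 - 1).toNat - pos) ++ r.2.2 ++ pvMerge lines r.2.1.toNat rest

theorem pvMerge_cons (lines : List String) (pos : Nat) (r : Int × Int × List String) (rest : List (Int × Int × List String)) :
    pvMerge lines pos (r :: rest) = (lines.drop pos).take ((r.1 - 1).toNat - pos) ++ r.2.2 ++ pvMerge lines r.2.1.toNat rest := rfl

-- A's per-change list transformation (del slice + reversed inserts)
def pvStepA (r : Int × Int × List String) (L : List String) : List String :=
  r.2.2.reverse.foldl (fun L c => PySem.List.insert L (r.1 - 1) c)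
    (L.take (PySem.List.clampIdx L.length (r.1 - 1)) ++
     L.drop (max (PySem.List.clampIdx L.length (r.1 - 1)) (PySem.List.clampIdx L.length r.2.1)))

theorem pv_extract_eq (changes : List (List (String × String))) (idm : PySem.Dict String Int) (acc : List (Int × Int × List String)) :
    changes.foldl (fun acc change =>
      let chd := PySem.Dict.ofList change
      let new_content := PySem.Dict.getD chd "new_content" ""
      if PySem.Dict.contains chd "line_id" then
        let line_num := PySem.Dict.getD idm (PySem.Dict.getD chd "line_id" "") 0
        acc ++ [(line_num, line_num, PySem.Str.splitlines new_content)]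
      else if PySem.Dict.contains chd "start_line_id" && PySem.Dict.contains chd "end_line_id" then
        let start_num := PySem.Dict.getD idm (PySem.Dict.getD chd "start_line_id" "") 0
        let end_num := PySem.Dict.getD idm (PySem.Dict.getD chd "end_line_id" "") 0
        acc ++ [(start_num, end_num, PySem.Str.splitlines new_content)]
      else acc) acc = acc ++ changes.flatMap (pvItemA idm) := by
  have hf : (fun (acc : List (Int × Int × List String)) (change : List (String × String)) =>
      let chd := PySem.Dict.ofList change
      let new_content := PySem.Dict.getD chd "new_content" ""
      if PySem.Dict.contains chd "line_id" then
        let line_num := PySem.Dict.getD idm (PySem.Dict.getD chd "line_id" "") 0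
        acc ++ [(line_num, line_num, PySem.Str.splitlines new_content)]
      else if PySem.Dict.contains chd "start_line_id" && PySem.Dict.contains chd "end_line_id" then
        let start_num := PySem.Dict.getD idm (PySem.Dict.getD chd "start_line_id" "") 0
        let end_num := PySem.Dict.getD idm (PySem.Dict.getD chd "end_line_id" "") 0
        acc ++ [(start_num, end_num, PySem.Str.splitlines new_content)]
      else acc)
      = (fun acc change => acc ++ pvItemA idm change) := by
    funext acc change
    simp only [pvItemA]
    split_ifs <;> simp
  rw [hf, PySem.List.foldl_append_eq_flatMap]

theorem pv_extract_eq_B (changes : List (List (String × String))) (idm : PySem.Dict String Int) (acc : List (Int × Int × List String)) :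
    changes.foldl (fun acc change =>
      let chd := PySem.Dict.ofList change
      match pvTargetB chd idm with
      | some t => acc ++ [(t.1, t.2, PySem.Str.splitlines (PySem.Dict.getD chd "new_content" ""))]
      | none => acc) acc = acc ++ changes.flatMap (pvItemA idm) := by
  have hf : (fun (acc : List (Int × Int × List String)) (change : List (String × String)) =>
      let chd := PySem.Dict.ofList change
      match pvTargetB chd idm with
      | some t => acc ++ [(t.1, t.2, PySem.Str.splitlines (PySem.Dict.getD chd "new_content" ""))]
      | none => acc)
      = (fun acc change => acc ++ pvItemA idm change) := by
    funext acc change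
    simp only [pvItemA, pvTargetB]
    split_ifs <;> simp
  rw [hf, PySem.List.foldl_append_eq_flatMap]

-- what one change contributes versus the range Pre_ reads off it
theorem pv_item_link (change : List (String × String)) (idm : PySem.Dict String Int) (t : Option (Int × Int))
    (h : pvRangeOfChange change idm = some t) :
    (pvItemA idm change).map (fun r => (r.1, r.2.1)) = t.toList := by
  unfold pvRangeOfChange at h
  unfold pvItemA
  dsimp only at h ⊢
  split_ifs at h ⊢ with h1 h2
  · rcases hg : PySem.Dict.get? idm (PySem.Dict.getD (PySem.Dict.ofList change) "line_id" "") with _ | n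
    · rw [hg] at h; exact absurd h (by simp)
    · rw [hg] at h
      simp only [Option.some.injEq] at h
      subst h
      simp only [PySem.Dict.getD] at hg ⊢
      simp [hg]
  · rcases hg1 : PySem.Dict.get? idm (PySem.Dict.getD (PySem.Dict.ofList change) "start_line_id" "") with _ | sn
    · rw [hg1] at h; exact absurd h (by simp)
    rcases hg2 : PySem.Dict.get? idm (PySem.Dict.getD (PySem.Dict.ofList change) "end_line_id" "") with _ | en
    · rw [hg1, hg2] at h; exact absurd h (by simp)
    rw [hg1, hg2] at h
    simp only [Option.some.injEq] at h
    subst h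
    simp only [PySem.Dict.getD] at hg1 hg2 ⊢
    simp [hg1, hg2]
  · simp only [Option.some.injEq] at h
    subst h
    simp

-- link the extraction with Pre_'s range list
theorem pv_ranges_link (changes : List (List (String × String))) (id_to_line : List (String × Int)) (ps : List (Int × Int))
    (h : pvRanges? changes id_to_line = some ps) :
    (changes.flatMap (pvItemA (PySem.Dict.ofList id_to_line))).map (fun r => (r.1, r.2.1)) = ps := by
  induction changes generalizing ps with
  | nil => simp [pvRanges?] at h; simp [h]
  | cons c cs ih =>
    unfold pvRanges? at h
    simp only [List.foldr_cons] at h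
    rcases h1 : pvRangeOfChange c (PySem.Dict.ofList id_to_line) with _ | t
    · rw [h1] at h; exact absurd h (by simp)
    rcases h2 : (pvRanges? cs id_to_line) with _ | rs
    · unfold pvRanges? at h2
      rw [h1, h2] at h
      rcases t with _ | r <;> simp at h
    · unfold pvRanges? at h2
      rw [h1, h2] at h
      have htail := ih rs (by unfold pvRanges?; exact h2)
      rcases t with _ | r
      · simp only [Option.some.injEq] at h
        subst h
        rw [List.flatMap_cons, List.map_append, pv_item_link c _ _ h1, htail]
        simp
      · simp only [Option.some.injEq] at h
        subst h
        rw [List.flatMap_cons, List.map_append, pv_item_link c _ _ h1, htail]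
        simp

theorem pv_insert_fold (c : List String) (L1 L2 : List String) (i : Int) (h : i = (L1.length : Int)) :
    c.reverse.foldl (fun L x => PySem.List.insert L i x) (L1 ++ L2) = L1 ++ c ++ L2 := by
  induction c generalizing L2 with
  | nil => simp
  | cons x t ih =>
    have hrev : (x :: t).reverse = t.reverse ++ [x] := by simp
    rw [hrev, List.foldl_append]
    rw [ih]
    simp only [List.foldl_cons, List.foldl_nil]
    rw [List.append_assoc, h, PySem.List.insert_natCast (L1 ++ (t ++ L2)) L1.length x (by simp)]
    rw [List.take_left' rfl, List.drop_left' rfl]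
    simp

theorem pv_stepA_eq (r : Int × Int × List String) (L : List String)
    (h1 : 1 ≤ r.1) (h2 : r.1 ≤ r.2.1) (h3 : r.2.1 ≤ (L.length : Int)) :
    pvStepA r L = L.take (r.1 - 1).toNat ++ r.2.2 ++ L.drop r.2.1.toNat := by
  unfold pvStepA
  have hs : PySem.List.clampIdx L.length (r.1 - 1) = (r.1 - 1).toNat := by
    rw [show r.1 - 1 = (((r.1 - 1).toNat : Nat) : Int) by omega, PySem.List.clampIdx_natCast]
    omega
  have he : PySem.List.clampIdx L.length r.2.1 = r.2.1.toNat := by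
    rw [show r.2.1 = ((r.2.1.toNat : Nat) : Int) by omega, PySem.List.clampIdx_natCast]
    omega
  rw [hs, he, show max (r.1 - 1).toNat r.2.1.toNat = r.2.1.toNat by omega]
  rw [pv_insert_fold r.2.2 (L.take (r.1 - 1).toNat) (L.drop r.2.1.toNat) (r.1 - 1)
      (by rw [List.length_take]; omega)]

-- main A-side lemma: successive application from the highest range down builds the merge
theorem pv_foldr_stepA (lines : List String) (asc : List (Int × Int × List String)) (pos : Nat)
    (hin : ∀ r ∈ asc, 1 ≤ r.1 ∧ r.1 ≤ r.2.1 ∧ r.2.1 ≤ (lines.length : Int))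
    (hpos : ∀ r ∈ asc, (pos : Int) < r.1)
    (hpair : asc.Pairwise (fun a b => a.2.1 < b.1))
    (hlen : pos ≤ lines.length) :
    asc.foldr pvStepA lines = lines.take pos ++ pvMerge lines pos asc := by
  induction asc generalizing pos with
  | nil => simp [pvMerge]
  | cons r rest ih =>
    obtain ⟨hr1, hr2, hr3⟩ := hin r (by simp)
    have he : ((r.2.1.toNat : Int)) = r.2.1 := by omega
    have hetn : r.2.1.toNat ≤ lines.length := by omega
    have hpair' := (List.pairwise_cons.mp hpair)
    have hinner := ih r.2.1.toNat (fun x hx => hin x (by simp [hx]))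
      (fun x hx => by rw [he]; exact hpair'.1 x hx) hpair'.2 hetn
    rw [List.foldr_cons, hinner]
    have hlentake : (lines.take r.2.1.toNat).length = r.2.1.toNat := by
      rw [List.length_take]; omega
    have hlin : r.2.1 ≤ ((lines.take r.2.1.toNat ++ pvMerge lines r.2.1.toNat rest).length : Int) := by
      rw [List.length_append, hlentake]; omega
    rw [pv_stepA_eq r _ hr1 hr2 hlin]
    have hsle : (r.1 - 1).toNat ≤ r.2.1.toNat := by omega
    rw [List.take_append_of_le_length (by omega), List.take_take,
        Nat.min_eq_left hsle, List.drop_left' hlentake]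
    have hple : pos ≤ (r.1 - 1).toNat := by
      have := hpos r (by simp); omega
    show lines.take (r.1 - 1).toNat ++ r.2.2 ++ pvMerge lines r.2.1.toNat rest
        = lines.take pos ++ pvMerge lines pos (r :: rest)
    rw [pvMerge_cons]
    have : lines.take ((r.1 - 1).toNat) = lines.take pos ++ (lines.drop pos).take ((r.1 - 1).toNat - pos) := by
      rw [← List.take_add]
      congr 1
      omega
    rw [this]
    simp [List.append_assoc]

-- B-side lemma: the accumulator fold builds the same merge and the same count
theorem pv_foldl_B (lines : List String) (asc : List (Int × Int × List String)) (out : List String) (pos cnt : Int)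
    (hin : ∀ r ∈ asc, 1 ≤ r.1 ∧ r.1 ≤ r.2.1 ∧ r.2.1 ≤ (lines.length : Int))
    (hpos : 0 ≤ pos ∧ ∀ r ∈ asc, pos < r.1)
    (hpair : asc.Pairwise (fun a b => a.2.1 < b.1)) :
    (let st := asc.foldl (fun (st : List String × Int × Int) r =>
        let o := st.1 ++ PySem.List.slice lines (some st.2.1) (some (r.1 - 1)) ++ r.2.2
        let changed := st.2.2 + pvW r
        (o, r.2.1, changed)) (out, pos, cnt)
     (st.1 ++ PySem.List.slice lines (some st.2.1) none, st.2.2))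
    = (out ++ pvMerge lines pos.toNat asc, cnt + (asc.map pvW).sum) := by
  induction asc generalizing out pos cnt with
  | nil =>
    simp only [List.foldl_nil, List.map_nil, List.sum_nil]
    rw [PySem.List.slice_from lines hpos.1]
    simp [pvMerge]
  | cons r rest ih =>
    obtain ⟨hr1, hr2, hr3⟩ := hin r (by simp)
    have hpair' := (List.pairwise_cons.mp hpair)
    have hrec := ih (out ++ PySem.List.slice lines (some pos) (some (r.1 - 1)) ++ r.2.2) r.2.1 (cnt + pvW r)
      (fun x hx => hin x (by simp [hx]))
      ⟨by omega, fun x hx => hpair'.1 x hx⟩ hpair'.2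
    simp only [List.foldl_cons]
    rw [hrec]
    have hslice : PySem.List.slice lines (some pos) (some (r.1 - 1))
        = (lines.drop pos.toNat).take ((r.1 - 1).toNat - pos.toNat) := by
      rw [PySem.List.slice_toNat lines hpos.1 (by omega)]
    rw [hslice, pvMerge_cons]
    simp only [Prod.mk.injEq, List.map_cons, List.sum_cons]
    refine ⟨?_, by ring⟩
    simp [List.append_assoc]

theorem pv_prod_foldr (l : List (Int × Int × List String)) (L0 : List String) (c0 : Int) :
    l.foldr (fun r st => (pvStepA r st.1, st.2 + pvW r)) (L0, c0)
      = (l.foldr pvStepA L0, c0 + (l.map pvW).sum) := by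
  induction l with
  | nil => simp
  | cons r t ih =>
    simp only [List.foldr_cons, ih, List.map_cons, List.sum_cons]
    refine congrArg _ ?_
    ring

-- ===== VERDICT (by name: the statement is the Claim_ definition above) =====
theorem apply_changes_spec : Claim_equal_apply_changes := by
  intro lines changes id_to_line _ hpre
  obtain ⟨hne, hbnd, hdisj⟩ := hpre
  rcases hps : pvRanges? changes id_to_line with _ | ps
  · exact absurd hps hne
  rw [hps] at hbnd hdisj
  simp only [Option.getD_some] at hbnd hdisj
  have hmap : (changes.flatMap (pvItemA (PySem.Dict.ofList id_to_line))).map (fun r => (r.1, r.2.1)) = ps :=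
    pv_ranges_link _ _ _ hps
  have hinrs : ∀ r ∈ changes.flatMap (pvItemA (PySem.Dict.ofList id_to_line)),
      1 ≤ r.1 ∧ r.1 ≤ r.2.1 ∧ r.2.1 ≤ (lines.length : Int) := by
    intro r hr
    exact hbnd _ (by rw [← hmap]; exact List.mem_map_of_mem hr)
  have hdisjrs : (changes.flatMap (pvItemA (PySem.Dict.ofList id_to_line))).Pairwise
      (fun a b => a.2.1 < b.1 ∨ b.2.1 < a.1) := by
    rw [← hmap] at hdisj
    exact List.pairwise_map.mp hdisj
  have hperm : (PySem.List.sorted (changes.flatMap (pvItemA (PySem.Dict.ofList id_to_line))) (fun x => x.1) false).Perm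
      (changes.flatMap (pvItemA (PySem.Dict.ofList id_to_line))) := PySem.List.sorted_perm _ _ _
  have hin : ∀ r ∈ PySem.List.sorted (changes.flatMap (pvItemA (PySem.Dict.ofList id_to_line))) (fun x => x.1) false,
      1 ≤ r.1 ∧ r.1 ≤ r.2.1 ∧ r.2.1 ≤ (lines.length : Int) :=
    fun r hr => hinrs r (hperm.mem_iff.mp hr)
  have hdisja := (hperm.pairwise_iff (R := fun a b => a.2.1 < b.1 ∨ b.2.1 < a.1) (fun h => h.symm.imp id id)).mpr hdisjrs
  have hle := PySem.List.sorted_pairwise (changes.flatMap (pvItemA (PySem.Dict.ofList id_to_line))) (fun x => x.1)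
  have hstrict : (PySem.List.sorted (changes.flatMap (pvItemA (PySem.Dict.ofList id_to_line))) (fun x => x.1) false).Pairwise
      (fun a b => a.2.1 < b.1) := by
    refine (hle.and hdisja).imp_of_mem ?_
    intro a b ha hb hab
    obtain ⟨b1, b2, b3⟩ := hin b hb
    rcases hab.2 with h | h
    · exact h
    · exact absurd hab.1 (by omega)
  have hstart : (PySem.List.sorted (changes.flatMap (pvItemA (PySem.Dict.ofList id_to_line))) (fun x => x.1) false).Pairwise
      (fun a b => a.1 < b.1) := by
    refine hstrict.imp_of_mem ?_
    intro a b ha hb hab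
    obtain ⟨a1, a2, a3⟩ := hin a ha
    omega
  have hdesc : PySem.List.sorted (changes.flatMap (pvItemA (PySem.Dict.ofList id_to_line))) (fun x => x.1) true
      = (PySem.List.sorted (changes.flatMap (pvItemA (PySem.Dict.ofList id_to_line))) (fun x => x.1) false).reverse :=
    PySem.List.sorted_rev_eq_of_perm_of_pairwise_gt _ _ _
      ((List.reverse_perm _).trans hperm) (List.pairwise_reverse.mpr hstart)
  show apply_changes lines changes id_to_line = apply_changes_alt lines changes id_to_line
  simp only [apply_changes, apply_changes_alt]
  rw [pv_extract_eq changes (PySem.Dict.ofList id_to_line) [],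
      pv_extract_eq_B changes (PySem.Dict.ofList id_to_line) []]
  simp only [List.nil_append]
  rw [hdesc, List.foldl_reverse]
  have hA : (fun (x : Int × Int × List String) (y : List String × Int) =>
      (fun (st : List String × Int) r =>
        let start_num := r.1
        let end_num := r.2.1
        let new_content_lines := r.2.2
        let lines_affected := end_num - start_num + 1
        let lines_changed := st.2 + max lines_affected (new_content_lines.length : Int)
        let s' := PySem.List.clampIdx st.1.length (start_num - 1)
        let e' := PySem.List.clampIdx st.1.length end_num
        let new_lines := st.1.take s' ++ st.1.drop (max s' e')
        let new_lines := new_content_lines.reverse.foldl (fun L content_line => PySem.List.insert L (start_num - 1) content_line) new_lines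
        (new_lines, lines_changed)) y x)
      = (fun r st => (pvStepA r st.1, st.2 + pvW r)) := rfl
  rw [hA, pv_prod_foldr, pv_foldr_stepA lines _ 0 hin (fun r hr => by have := (hin r hr).1; omega) hstrict (by omega)]
  have hB := pv_foldl_B lines (PySem.List.sorted (changes.flatMap (pvItemA (PySem.Dict.ofList id_to_line))) (fun x => x.1) false)
      [] 0 0 hin ⟨le_refl 0, fun r hr => by have := (hin r hr).1; omega⟩ hstrict
  simp only [pvW] at hB
  rw [hB]
  simp
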